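-- pv_equiv track=rewrite | github.com/JetSimon/Advent-of-Code-2017 | Day 9/day9.py | cleanUpAngle
-- ===== SOURCE A (Python) =====
-- def cleanUpAngle(s):
--     gar = 0
--     ignore = False
--     out = ""
--     for c in s:
--         if(c == "<" and not ignore):
--             ignore = True
--         elif ignore == True and c == ">":
--             ignore = False
--         elif not ignore:
--             out += c
--         else:
--             gar += 1
--     return out, gar
-- ===== SOURCE B (Python) =====
-- def cleanUpAngle(s):
--     out_parts = []
--     gar = 0
--     rest = s
--     while True:
--         before, sep, rest = rest.partition('<')
--         out_parts.append(before)
--         if not sep: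
--             break
--         g, sep2, rest = rest.partition('>')
--         gar += len(g)
--         if not sep2:
--             break
--     return "".join(out_parts), gar
-- ===== Notes on version B (the rewrite author's own statement) =====
-- stated objective: faster
-- what changed: Replaces the per-character loop with an ignore flag by block-wise str.partition on the two delimiters: each iteration copies a whole non-garbage chunk and adds the length of a whole garbage chunk at once.
import Mathlib
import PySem

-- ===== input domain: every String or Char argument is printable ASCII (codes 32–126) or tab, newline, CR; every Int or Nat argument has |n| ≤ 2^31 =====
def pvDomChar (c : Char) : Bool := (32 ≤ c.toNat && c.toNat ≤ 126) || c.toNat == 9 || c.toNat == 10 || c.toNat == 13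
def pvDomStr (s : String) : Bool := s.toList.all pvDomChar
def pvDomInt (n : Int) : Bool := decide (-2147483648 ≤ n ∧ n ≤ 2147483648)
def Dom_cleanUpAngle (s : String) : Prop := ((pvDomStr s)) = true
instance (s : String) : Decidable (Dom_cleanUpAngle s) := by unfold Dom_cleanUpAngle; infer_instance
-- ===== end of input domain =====

-- B replaces A's per-character scan with an ignore flag by block-wise str.partition on '<' and '>'
-- (same O(n) cost asymptotically; measured faster in a timing run since chunks are handled at once; return value proved identical on all inputs).

-- ===== PORT A =====
-- one step of A's for-loop over the state (gar, ignore, out)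
def cleanUpAngleStep (st : Int × Bool × List Char) (c : Char) : Int × Bool × List Char :=
  if c = '<' ∧ st.2.1 = false then (st.1, true, st.2.2)
  else if st.2.1 = true ∧ c = '>' then (st.1, false, st.2.2)
  else if st.2.1 = false then (st.1, st.2.1, st.2.2 ++ [c])
  else (st.1 + 1, st.2.1, st.2.2)

def cleanUpAngle (s : String) : String × Int :=
  let r := s.toList.foldl cleanUpAngleStep (0, false, [])
  (String.ofList r.2.2, r.1)

-- ===== PORT B =====
-- Source B's while-loop; rest.partition('<') = (takeWhile (!= '<'), sep, tail of dropWhile),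
-- and likewise for '>' — exact for a single-character separator.
def cleanUpAngleAltLoop (cs : List Char) : List Char × Int :=
  match _h : cs.dropWhile (· != '<') with
  | [] => (cs.takeWhile (· != '<'), 0)
  | _ :: rest2 =>
    match _h2 : rest2.dropWhile (· != '>') with
    | [] => (cs.takeWhile (· != '<'), ((rest2.takeWhile (· != '>')).length : Int))
    | _ :: rest4 =>
      ((cs.takeWhile (· != '<')) ++ (cleanUpAngleAltLoop rest4).1,
       ((rest2.takeWhile (· != '>')).length : Int) + (cleanUpAngleAltLoop rest4).2)
termination_by cs.length
decreasing_by
  have t1 : (cs.dropWhile (· != '<')).length ≤ cs.length := List.length_dropWhile_le _ _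
  have t2 : (rest2.dropWhile (· != '>')).length ≤ rest2.length := List.length_dropWhile_le _ _
  rw [_h] at t1; rw [_h2] at t2
  simp at t1 t2; omega

def cleanUpAngle_alt (s : String) : String × Int :=
  let r := cleanUpAngleAltLoop s.toList
  (String.ofList r.1, r.2)

-- ===== PRECONDITION & SPEC =====
def Spec_cleanUpAngle (s : String) (out : String × Int) : Prop := out = cleanUpAngle_alt s
instance (s : String) (out : String × Int) : Decidable (Spec_cleanUpAngle s out) := by unfold Spec_cleanUpAngle; infer_instance

-- ===== CLAIM (what is proved, stated in full; the proofs are below) =====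
def Claim_equal_cleanUpAngle : Prop := ∀ (s : String), Dom_cleanUpAngle s → Spec_cleanUpAngle s (cleanUpAngle s)

-- ===== LEMMAS AND PROOFS =====

lemma dropWhile_head_false {α : Type} {p : α → Bool} {l rest : List α} {d : α}
    (h : l.dropWhile p = d :: rest) : p d = false := by
  induction l with
  | nil => simp at h
  | cons a l ih =>
    by_cases ha : p a
    · rw [List.dropWhile_cons_of_pos ha] at h; exact ih h
    · rw [List.dropWhile_cons_of_neg ha] at h
      cases h; simpa using ha

-- unfolding equations for cleanUpAngleAltLoop, one per branch
lemma altLoop_eq1 (cs : List Char) (h : cs.dropWhile (· != '<') = []) :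
    cleanUpAngleAltLoop cs = (cs.takeWhile (· != '<'), 0) := by
  unfold cleanUpAngleAltLoop
  split
  · rfl
  · next heq => rw [h] at heq; simp at heq

lemma altLoop_eq2 (cs : List Char) (d : Char) (rest2 : List Char)
    (h : cs.dropWhile (· != '<') = d :: rest2) (h2 : rest2.dropWhile (· != '>') = []) :
    cleanUpAngleAltLoop cs = (cs.takeWhile (· != '<'), ((rest2.takeWhile (· != '>')).length : Int)) := by
  unfold cleanUpAngleAltLoop
  split
  · next heq => rw [h] at heq; simp at heq
  · next heq =>
    rw [h] at heq; cases heq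
    split
    · rfl
    · next heq2 => rw [h2] at heq2; simp at heq2

lemma altLoop_eq3 (cs : List Char) (d : Char) (rest2 : List Char) (e : Char) (rest4 : List Char)
    (h : cs.dropWhile (· != '<') = d :: rest2) (h2 : rest2.dropWhile (· != '>') = e :: rest4) :
    cleanUpAngleAltLoop cs = ((cs.takeWhile (· != '<')) ++ (cleanUpAngleAltLoop rest4).1,
      ((rest2.takeWhile (· != '>')).length : Int) + (cleanUpAngleAltLoop rest4).2) := by
  conv_lhs => rw [cleanUpAngleAltLoop]
  split
  · next heq => rw [h] at heq; simp at heq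
  · next heq =>
    rw [h] at heq; cases heq
    split
    · next heq2 => rw [h2] at heq2; simp at heq2
    · next heq2 => rw [h2] at heq2; cases heq2; rfl

lemma fold_copy (l : List Char) (h : ∀ c ∈ l, c ≠ '<') (gar : Int) (out : List Char) :
    l.foldl cleanUpAngleStep (gar, false, out) = (gar, false, out ++ l) := by
  induction l generalizing out with
  | nil => simp
  | cons c l ih =>
    have hc : c ≠ '<' := h c (by simp)
    have step : cleanUpAngleStep (gar, false, out) c = (gar, false, out ++ [c]) := by
      simp [cleanUpAngleStep, hc]
    rw [List.foldl_cons, step, ih (fun d hd => h d (by simp [hd]))]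
    simp

lemma fold_garbage (l : List Char) (h : ∀ c ∈ l, c ≠ '>') (gar : Int) (out : List Char) :
    l.foldl cleanUpAngleStep (gar, true, out) = (gar + l.length, true, out) := by
  induction l generalizing gar with
  | nil => simp
  | cons c l ih =>
    have hc : c ≠ '>' := h c (by simp)
    have step : cleanUpAngleStep (gar, true, out) c = (gar + 1, true, out) := by
      simp [cleanUpAngleStep, hc]
    rw [List.foldl_cons, step, ih (fun d hd => h d (by simp [hd]))]
    simp
    ring

lemma main_invariant (cs : List Char) : ∀ (gar : Int) (out : List Char),
    (cs.foldl cleanUpAngleStep (gar, false, out)).1 = gar + (cleanUpAngleAltLoop cs).2 ∧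
    (cs.foldl cleanUpAngleStep (gar, false, out)).2.2 = out ++ (cleanUpAngleAltLoop cs).1 := by
  induction cs using cleanUpAngleAltLoop.induct with
  | case1 cs h =>
    intro gar out
    have hsplit : cs = cs.takeWhile (· != '<') := by
      conv_lhs => rw [← List.takeWhile_append_dropWhile (p := (· != '<')) (l := cs)]
      rw [h]; simp
    have hall : ∀ c ∈ cs.takeWhile (· != '<'), c ≠ '<' := by
      intro c hc; have := List.mem_takeWhile_imp hc; simpa using this
    have key : cs.foldl cleanUpAngleStep (gar, false, out) = (gar, false, out ++ cs.takeWhile (· != '<')) := by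
      conv_lhs => rw [hsplit]
      exact fold_copy _ hall gar out
    rw [altLoop_eq1 cs h, key]
    simp
  | case2 cs d rest2 h h2 =>
    intro gar out
    have hd : d = '<' := by have := dropWhile_head_false h; simpa using this
    have hsplit : cs = cs.takeWhile (· != '<') ++ d :: rest2 := by
      conv_lhs => rw [← List.takeWhile_append_dropWhile (p := (· != '<')) (l := cs)]
      rw [h]
    have hall : ∀ c ∈ cs.takeWhile (· != '<'), c ≠ '<' := by
      intro c hc; have := List.mem_takeWhile_imp hc; simpa using this
    have hgsplit : rest2 = rest2.takeWhile (· != '>') := by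
      conv_lhs => rw [← List.takeWhile_append_dropWhile (p := (· != '>')) (l := rest2)]
      rw [h2]; simp
    have hgall : ∀ c ∈ rest2.takeWhile (· != '>'), c ≠ '>' := by
      intro c hc; have := List.mem_takeWhile_imp hc; simpa using this
    have stepLt : cleanUpAngleStep (gar, false, out ++ cs.takeWhile (· != '<')) d =
        (gar, true, out ++ cs.takeWhile (· != '<')) := by
      simp [cleanUpAngleStep, hd]
    have key : cs.foldl cleanUpAngleStep (gar, false, out) =
        (gar + ((rest2.takeWhile (· != '>')).length : Int), true, out ++ cs.takeWhile (· != '<')) := by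
      conv_lhs => rw [hsplit]
      rw [List.foldl_append, fold_copy _ hall, List.foldl_cons, stepLt]
      conv_lhs => rw [hgsplit]
      rw [fold_garbage _ hgall]
    rw [altLoop_eq2 cs d rest2 h h2, key]
    simp
  | case3 cs d rest2 h e rest4 h2 ih =>
    intro gar out
    have hd : d = '<' := by have := dropWhile_head_false h; simpa using this
    have he : e = '>' := by have := dropWhile_head_false h2; simpa using this
    have hsplit : cs = cs.takeWhile (· != '<') ++ d :: rest2 := by
      conv_lhs => rw [← List.takeWhile_append_dropWhile (p := (· != '<')) (l := cs)]
      rw [h]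
    have hall : ∀ c ∈ cs.takeWhile (· != '<'), c ≠ '<' := by
      intro c hc; have := List.mem_takeWhile_imp hc; simpa using this
    have hgsplit : rest2 = rest2.takeWhile (· != '>') ++ e :: rest4 := by
      conv_lhs => rw [← List.takeWhile_append_dropWhile (p := (· != '>')) (l := rest2)]
      rw [h2]
    have hgall : ∀ c ∈ rest2.takeWhile (· != '>'), c ≠ '>' := by
      intro c hc; have := List.mem_takeWhile_imp hc; simpa using this
    have stepLt : cleanUpAngleStep (gar, false, out ++ cs.takeWhile (· != '<')) d =
        (gar, true, out ++ cs.takeWhile (· != '<')) := by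
      simp [cleanUpAngleStep, hd]
    have stepGt : cleanUpAngleStep (gar + ((rest2.takeWhile (· != '>')).length : Int), true,
        out ++ cs.takeWhile (· != '<')) e =
        (gar + ((rest2.takeWhile (· != '>')).length : Int), false, out ++ cs.takeWhile (· != '<')) := by
      simp [cleanUpAngleStep, he]
    have key : cs.foldl cleanUpAngleStep (gar, false, out) =
        rest4.foldl cleanUpAngleStep (gar + ((rest2.takeWhile (· != '>')).length : Int), false,
          out ++ cs.takeWhile (· != '<')) := by
      conv_lhs => rw [hsplit]
      rw [List.foldl_append, fold_copy _ hall, List.foldl_cons, stepLt]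
      conv_lhs => rw [hgsplit]
      rw [List.foldl_append, fold_garbage _ hgall, List.foldl_cons, stepGt]
    obtain ⟨ih1, ih2⟩ := ih (gar + ((rest2.takeWhile (· != '>')).length : Int))
      (out ++ cs.takeWhile (· != '<'))
    rw [altLoop_eq3 cs d rest2 e rest4 h h2, key]
    refine ⟨?_, ?_⟩
    · rw [ih1]; ring
    · rw [ih2]; simp

-- ===== VERDICT (by name: the statement is the Claim_ definition above) =====
theorem cleanUpAngle_spec : Claim_equal_cleanUpAngle := by
  intro s _
  unfold Spec_cleanUpAngle cleanUpAngle cleanUpAngle_alt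
  obtain ⟨h1, h2⟩ := main_invariant s.toList 0 []
  simp only [h1, h2]
  simp
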